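-- pv_equiv track=rewrite | github.com/Mao-beta/AtCoder | ABC/ABC007/ABC007D.py | forbidden
-- ===== SOURCE A (Python) =====
-- def forbidden(n):
--     # dp[i][j]はNの上からi桁目(0-origin)まで決まっていてN未満不確定/確定(j=0,1)のときの場合の数
--     n_str = str(n)
--     dp = [[0, 0] for _ in range(len(n_str) + 1)]
--     dp[0][0] = 1
--     for i in range(len(n_str)):
--         digit = int(n_str[i])
--         for d in range(digit+1):
--             if d == 4 or d == 9:
--                 continue
--             if d == digit:
--                 dp[i+1][0] += dp[i][0]
--             else:
--                 dp[i+1][1] += dp[i][0]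
--         dp[i+1][1] += dp[i][1] * 8
--     return n - sum(dp[len(n_str)])
-- ===== SOURCE B (Python) =====
-- def forbidden(n):
--     s = str(n)
--     clean = 0
--     ok = True
--     for i, ch in enumerate(s):
--         g = int(ch)
--         clean += (g - (1 if g > 4 else 0)) * 8 ** (len(s) - 1 - i)
--         if g == 4 or g == 9:
--             ok = False
--             break
--     if ok:
--         clean += 1
--     return n - clean
-- ===== Notes on version B (the rewrite author's own statement) =====
-- stated objective: simpler
-- what changed: Replaces the (len+1) x 2 DP table and the inner loop over range(digit+1) by a single left-to-right scan that keeps one running count: while the prefix is clean it adds (digit - (1 if digit>4 else 0)) * 8**remaining, breaks at the first 4/9 digit, and adds 1 at the end if n itself is clean.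
import Mathlib
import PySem

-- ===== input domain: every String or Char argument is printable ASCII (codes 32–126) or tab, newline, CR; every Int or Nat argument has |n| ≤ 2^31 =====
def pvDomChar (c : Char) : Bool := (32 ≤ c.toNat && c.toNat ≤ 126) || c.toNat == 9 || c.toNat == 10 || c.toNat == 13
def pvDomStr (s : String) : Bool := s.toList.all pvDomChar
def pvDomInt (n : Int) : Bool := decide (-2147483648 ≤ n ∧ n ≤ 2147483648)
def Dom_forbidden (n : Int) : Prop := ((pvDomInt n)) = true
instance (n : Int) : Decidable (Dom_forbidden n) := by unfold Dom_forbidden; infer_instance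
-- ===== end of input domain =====

-- B replaces A's (len+1)×2 DP table and inner digit loop by one scan with a running count (objective: simpler).

-- ===== PORT A =====
def forbidden (n : Int) : Int :=
  let nStr := PySem.Int.toChars n
  let L : Int := (nStr.length : Int)
  let dp0 : List (Int × Int) := (PySem.List.pyRange 0 (L + 1) 1).map (fun _ => ((0 : Int), (0 : Int)))
  let dp1 := PySem.List.pySetD dp0 0 (1, 0)
  let dpF := (PySem.List.pyRange 0 L 1).foldl (fun dp i =>
    let digit := (PySem.Int.ofChars? [PySem.List.pyGetD nStr i ' ']).getD 0
    let dp2 := (PySem.List.pyRange 0 (digit + 1) 1).foldl (fun dp d =>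
      if d = 4 ∨ d = 9 then dp
      else if d = digit then
        PySem.List.pySetD dp (i + 1)
          ((PySem.List.pyGetD dp (i + 1) (0, 0)).1 + (PySem.List.pyGetD dp i (0, 0)).1,
           (PySem.List.pyGetD dp (i + 1) (0, 0)).2)
      else
        PySem.List.pySetD dp (i + 1)
          ((PySem.List.pyGetD dp (i + 1) (0, 0)).1,
           (PySem.List.pyGetD dp (i + 1) (0, 0)).2 + (PySem.List.pyGetD dp i (0, 0)).1)) dp
    PySem.List.pySetD dp2 (i + 1)
      ((PySem.List.pyGetD dp2 (i + 1) (0, 0)).1,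
       (PySem.List.pyGetD dp2 (i + 1) (0, 0)).2 + (PySem.List.pyGetD dp2 i (0, 0)).2 * 8)) dp1
  n - ((PySem.List.pyGetD dpF L (0, 0)).1 + (PySem.List.pyGetD dpF L (0, 0)).2)

-- ===== PORT B =====
def altLoop (cs : List Char) (acc : Int) : Int :=
  match cs with
  | [] => acc + 1
  | c :: rest =>
    let g := (PySem.Int.ofChars? [c]).getD 0
    let acc' := acc + (g - (if 4 < g then 1 else 0)) * (8 : Int) ^ rest.length
    if g = 4 ∨ g = 9 then acc' else altLoop rest acc'

def forbidden_alt (n : Int) : Int := n - altLoop (PySem.Int.toChars n) 0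

-- ===== PRECONDITION & SPEC =====
-- A raises ValueError on n < 0 (int('-') on the sign character of str(n)); Pre_ excludes exactly those.
def Pre_forbidden (n : Int) : Prop := 0 ≤ n
instance (n : Int) : Decidable (Pre_forbidden n) := by unfold Pre_forbidden; infer_instance
def pvWitness_forbidden : Int := 100
def Spec_forbidden (n : Int) (out : Int) : Prop := out = forbidden_alt n
instance (n : Int) (out : Int) : Decidable (Spec_forbidden n out) := by unfold Spec_forbidden; infer_instance

-- ===== CLAIM (what is proved, stated in full; the proofs are below) =====
def Claim_equal_forbidden : Prop := ∀ (n : Int), Dom_forbidden n → Pre_forbidden n → Spec_forbidden n (forbidden n)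

-- ===== LEMMAS AND PROOFS =====

-- value of a digit character, as both ports compute it
def dig (c : Char) : Int := (PySem.Int.ofChars? [c]).getD 0
-- number of allowed digits (not 4, not 9) strictly below g, for 0 ≤ g ≤ 9
def cg (g : Int) : Int := g - (if 4 < g then 1 else 0)
-- one step of the dp recurrence on the pair (unfixed, fixed-below)
def stepP (p : Int × Int) (g : Int) : Int × Int :=
  ((if g = 4 ∨ g = 9 then 0 else p.1), p.1 * cg g + p.2 * 8)
def isDig (c : Char) : Prop := ∃ k : Nat, k < 10 ∧ c = Nat.digitChar k

-- the body of A's outer loop, named so the proofs can speak about it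
def aBody (nStr : List Char) (dp : List (Int × Int)) (i : Int) : List (Int × Int) :=
  let digit := (PySem.Int.ofChars? [PySem.List.pyGetD nStr i ' ']).getD 0
  let dp2 := (PySem.List.pyRange 0 (digit + 1) 1).foldl (fun dp d =>
    if d = 4 ∨ d = 9 then dp
    else if d = digit then
      PySem.List.pySetD dp (i + 1)
        ((PySem.List.pyGetD dp (i + 1) (0, 0)).1 + (PySem.List.pyGetD dp i (0, 0)).1,
         (PySem.List.pyGetD dp (i + 1) (0, 0)).2)
    else
      PySem.List.pySetD dp (i + 1)
        ((PySem.List.pyGetD dp (i + 1) (0, 0)).1,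
         (PySem.List.pyGetD dp (i + 1) (0, 0)).2 + (PySem.List.pyGetD dp i (0, 0)).1)) dp
  PySem.List.pySetD dp2 (i + 1)
    ((PySem.List.pyGetD dp2 (i + 1) (0, 0)).1,
     (PySem.List.pyGetD dp2 (i + 1) (0, 0)).2 + (PySem.List.pyGetD dp2 i (0, 0)).2 * 8)

lemma forbidden_eq (n : Int) :
    forbidden n =
      n - ((PySem.List.pyGetD
              ((PySem.List.pyRange 0 ((PySem.Int.toChars n).length : Int) 1).foldl
                (aBody (PySem.Int.toChars n))
                (PySem.List.pySetD
                  ((PySem.List.pyRange 0 (((PySem.Int.toChars n).length : Int) + 1) 1).map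
                    (fun _ => ((0 : Int), (0 : Int)))) 0 (1, 0)))
              ((PySem.Int.toChars n).length : Int) (0, 0)).1
          + (PySem.List.pyGetD
              ((PySem.List.pyRange 0 ((PySem.Int.toChars n).length : Int) 1).foldl
                (aBody (PySem.Int.toChars n))
                (PySem.List.pySetD
                  ((PySem.List.pyRange 0 (((PySem.Int.toChars n).length : Int) + 1) 1).map
                    (fun _ => ((0 : Int), (0 : Int)))) 0 (1, 0)))
              ((PySem.Int.toChars n).length : Int) (0, 0)).2) := rfl

lemma dig_digitChar (k : Nat) (h : k < 10) : dig (Nat.digitChar k) = (k : Int) := by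
  interval_cases k <;> rfl

lemma dig_bounds (c : Char) (h : isDig c) : 0 ≤ dig c ∧ dig c ≤ 9 := by
  obtain ⟨k, hk, rfl⟩ := h
  rw [dig_digitChar k hk]
  omega

lemma mem_toDigitsCore (f : Nat) : ∀ (n : Nat) (ds : List Char) (c : Char),
    c ∈ Nat.toDigitsCore 10 f n ds → isDig c ∨ c ∈ ds := by
  induction f with
  | zero => intro n ds c h; exact Or.inr h
  | succ f ih =>
    intro n ds c h
    simp only [Nat.toDigitsCore] at h
    split at h
    · rcases List.mem_cons.mp h with h | h
      · exact Or.inl ⟨n % 10, Nat.mod_lt _ (by norm_num), h⟩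
      · exact Or.inr h
    · rcases ih _ _ _ h with h | h
      · exact Or.inl h
      · rcases List.mem_cons.mp h with h | h
        · exact Or.inl ⟨n % 10, Nat.mod_lt _ (by norm_num), h⟩
        · exact Or.inr h

lemma toChars_digits (n : Int) (h : 0 ≤ n) : ∀ c ∈ PySem.Int.toChars n, isDig c := by
  intro c hc
  unfold PySem.Int.toChars at hc
  rw [if_neg (by omega)] at hc
  rcases mem_toDigitsCore _ _ _ _ hc with h' | h'
  · exact h'
  · simp at h'

-- spec-level value of A's inner loop, for a digit 0 ≤ g ≤ 9
lemma spec_inner (g : Int) (h0 : 0 ≤ g) (h9 : g ≤ 9) (q a : Int × Int) :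
    (PySem.List.pyRange 0 (g + 1) 1).foldl
      (fun q d => if d = 4 ∨ d = 9 then q
        else (fun (d : Int) (q a : Int × Int) =>
          if d = g then (q.1 + a.1, q.2) else (q.1, q.2 + a.1)) d q a) q
    = ((if g = 4 ∨ g = 9 then q.1 else q.1 + a.1), q.2 + a.1 * cg g) := by
  interval_cases g <;>
    · norm_num [PySem.List.pyRange_one, cg]
      try simp [List.range_succ]
      try ring_nf
      try simp

-- folding pySetD-at-j steps equals one pySetD of the folded pair (j fixed, i ≠ j read-only)
lemma inner_general (f : Int → Int × Int → Int × Int → Int × Int) :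
    ∀ (ds : List Int) (dp : List (Int × Int)) (j i : Nat), j < dp.length → i ≠ j →
    ds.foldl (fun dp d => if d = 4 ∨ d = 9 then dp
        else dp.set j (f d (dp.getD j (0, 0)) (dp.getD i (0, 0)))) dp
    = dp.set j (ds.foldl (fun q d => if d = 4 ∨ d = 9 then q else f d q (dp.getD i (0, 0)))
        (dp.getD j (0, 0))) := by
  intro ds
  induction ds with
  | nil =>
    intro dp j i hj _
    simp [List.getD_eq_getElem?_getD, List.getElem?_eq_getElem hj, List.set_getElem_self]
  | cons d ds ih =>
    intro dp j i hj hij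
    by_cases hd : d = 4 ∨ d = 9
    · simp only [List.foldl_cons, if_pos hd]
      exact ih dp j i hj hij
    · simp only [List.foldl_cons, if_neg hd]
      rw [ih _ j i (by simpa using hj) hij]
      have hgj : (dp.set j (f d (dp.getD j (0, 0)) (dp.getD i (0, 0)))).getD j (0, 0)
          = f d (dp.getD j (0, 0)) (dp.getD i (0, 0)) := by
        simp [List.getD_eq_getElem?_getD, hj]
      have hgi : (dp.set j (f d (dp.getD j (0, 0)) (dp.getD i (0, 0)))).getD i (0, 0)
          = dp.getD i (0, 0) := by
        simp [List.getD_eq_getElem?_getD,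
          List.getElem?_set_ne (show j ≠ i from fun h => hij h.symm)]
      rw [hgj, hgi, List.set_set]

-- one outer-loop step of A, evaluated under the invariant
lemma aBody_eval (cs : List Char) (dp : List (Int × Int)) (k : Nat)
    (hk : k < cs.length) (hlen : dp.length = cs.length + 1)
    (hz : dp.getD (k + 1) (0, 0) = (0, 0))
    (hdig : isDig cs[k]) :
    aBody cs dp (k : Int) = dp.set (k + 1) (stepP (dp.getD k (0, 0)) (dig cs[k])) := by
  obtain ⟨h0, h9⟩ := dig_bounds _ hdig
  have hgetc : PySem.List.pyGetD cs (k : Int) ' ' = cs[k] := by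
    rw [PySem.List.pyGetD_natCast]; exact List.getD_eq_getElem _ _ hk
  have hcast : ((k : Int) + 1) = (((k + 1 : Nat) : Nat) : Int) := by push_cast; ring
  simp only [aBody, hgetc]
  rw [show (PySem.Int.ofChars? [cs[k]]).getD 0 = dig cs[k] from rfl]
  rw [hcast]
  simp only [PySem.List.pySetD_natCast, PySem.List.pyGetD_natCast]
  have hfun : (fun (dp : List (Int × Int)) (d : Int) =>
      if d = 4 ∨ d = 9 then dp
      else if d = dig cs[k] then
        dp.set (k + 1) ((dp.getD (k + 1) (0, 0)).1 + (dp.getD k (0, 0)).1, (dp.getD (k + 1) (0, 0)).2)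
      else
        dp.set (k + 1) ((dp.getD (k + 1) (0, 0)).1, (dp.getD (k + 1) (0, 0)).2 + (dp.getD k (0, 0)).1))
    = (fun (dp : List (Int × Int)) (d : Int) =>
      if d = 4 ∨ d = 9 then dp
      else dp.set (k + 1)
        ((fun (d : Int) (q a : Int × Int) =>
            if d = dig cs[k] then (q.1 + a.1, q.2) else (q.1, q.2 + a.1)) d
          (dp.getD (k + 1) (0, 0)) (dp.getD k (0, 0)))) := by
    funext dp d
    by_cases h1 : d = 4 ∨ d = 9 <;> by_cases h2 : d = dig cs[k] <;> simp [h1, h2]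
  rw [hfun,
    inner_general (fun (d : Int) (q a : Int × Int) =>
        if d = dig cs[k] then (q.1 + a.1, q.2) else (q.1, q.2 + a.1))
      (PySem.List.pyRange 0 (dig cs[k] + 1) 1) dp (k + 1) k (by omega) (by omega)]
  rw [hz]
  rw [spec_inner (dig cs[k]) h0 h9 (0, 0) (dp.getD k (0, 0))]
  have hsetget : ∀ v : Int × Int, (dp.set (k + 1) v).getD (k + 1) (0, 0) = v := by
    intro v
    simp [List.getD_eq_getElem?_getD, show k + 1 < dp.length by omega]
  have hsetgetk : ∀ v : Int × Int, (dp.set (k + 1) v).getD k (0, 0) = dp.getD k (0, 0) := by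
    intro v
    simp [List.getD_eq_getElem?_getD, List.getElem?_set_ne (show k + 1 ≠ k by omega)]
  rw [hsetget, hsetgetk, List.set_set]
  congr 1
  simp only [stepP, Prod.mk.injEq]
  constructor
  · split <;> norm_num
  · norm_num
    try ring

-- A's outer loop, from position k on, under the invariant
lemma outer (cs : List Char) (hd : ∀ c ∈ cs, isDig c) :
    ∀ (m k : Nat) (dp : List (Int × Int)),
    m + k = cs.length →
    dp.length = cs.length + 1 →
    (∀ j (hj : j < dp.length), k < j → dp[j] = (0, 0)) →
    PySem.List.pyGetD ((List.range' k m).foldl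
        (fun (dp : List (Int × Int)) (kk : Nat) => aBody cs dp (kk : Int)) dp)
        ((cs.length : Nat) : Int) (0, 0)
      = ((cs.drop k).map dig).foldl stepP (PySem.List.pyGetD dp ((k : Nat) : Int) (0, 0)) := by
  intro m
  induction m with
  | zero =>
    intro k dp hmk hlen hz
    have hk : k = cs.length := by omega
    subst hk
    simp [List.drop_length]
  | succ m ih =>
    intro k dp hmk hlen hz
    have hk : k < cs.length := by omega
    have hz1 : dp.getD (k + 1) (0, 0) = (0, 0) := by
      rw [List.getD_eq_getElem _ _ (by omega)]
      exact hz (k + 1) (by omega) (by omega)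
    rw [List.range'_succ, List.foldl_cons,
      aBody_eval cs dp k hk hlen hz1 (hd _ (List.getElem_mem hk))]
    rw [ih (k + 1) (dp.set (k + 1) (stepP (dp.getD k (0, 0)) (dig cs[k])))
      (by omega) (by simp [hlen])
      (by
        intro j hj hjk
        rw [List.getElem_set_ne (show k + 1 ≠ j by omega)]
        exact hz j (by simpa using hj) (by omega))]
    rw [List.drop_eq_getElem_cons hk, List.map_cons, List.foldl_cons]
    congr 1
    rw [PySem.List.pyGetD_natCast, PySem.List.pyGetD_natCast]
    simp [List.getD_eq_getElem?_getD, show k + 1 < dp.length by omega]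

lemma A_eval (n : Int) (h : ∀ c ∈ PySem.Int.toChars n, isDig c) :
    forbidden n =
      n - ((((PySem.Int.toChars n).map dig).foldl stepP (1, 0)).1
           + (((PySem.Int.toChars n).map dig).foldl stepP (1, 0)).2) := by
  rw [forbidden_eq]
  congr 1
  set cs := PySem.Int.toChars n with hcs
  have hdp1 : PySem.List.pySetD ((PySem.List.pyRange 0 ((cs.length : Int) + 1) 1).map
        (fun _ => ((0 : Int), (0 : Int)))) 0 (1, 0)
      = ((PySem.List.pyRange 0 ((cs.length : Int) + 1) 1).map
        (fun _ => ((0 : Int), (0 : Int)))).set 0 (1, 0) := by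
    rw [show ((0 : Int)) = (((0 : Nat) : Nat) : Int) by simp, PySem.List.pySetD_natCast]
  rw [hdp1]
  rw [PySem.List.pyRange_one 0 (cs.length : Int), List.foldl_map]
  rw [show (((cs.length : Int)) - 0).toNat = cs.length by omega, List.range_eq_range']
  have hfeq : (fun (dp : List (Int × Int)) (k : Nat) => aBody cs dp (0 + (k : Int)))
      = (fun (dp : List (Int × Int)) (kk : Nat) => aBody cs dp (kk : Int)) := by
    funext dp k
    rw [zero_add]
  rw [hfeq]
  have hout := outer cs h cs.length 0
    (((PySem.List.pyRange 0 ((cs.length : Int) + 1) 1).map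
        (fun _ => ((0 : Int), (0 : Int)))).set 0 (1, 0))
    (by omega) (by simp)
    (by
      intro j hj hj0
      rw [List.getElem_set_ne (show 0 ≠ j by omega)]
      simp)
  rw [List.drop_zero] at hout
  rw [hout]
  have hget0 : PySem.List.pyGetD (((PySem.List.pyRange 0 ((cs.length : Int) + 1) 1).map
        (fun _ => ((0 : Int), (0 : Int)))).set 0 (1, 0)) (((0 : Nat) : Nat) : Int) (0, 0)
      = ((1 : Int), (0 : Int)) := by
    rw [PySem.List.pyGetD_natCast]
    simp [List.getD_eq_getElem?_getD, show (0 : Nat) < cs.length + 1 by omega]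
  rw [hget0]

lemma altLoop_acc : ∀ (cs : List Char) (acc : Int), altLoop cs acc = acc + altLoop cs 0 := by
  intro cs
  induction cs with
  | nil => intro acc; simp [altLoop]
  | cons c rest ih =>
    intro acc
    simp only [altLoop]
    split
    · ring
    · rw [ih (acc + _), ih (0 + _)]
      ring

lemma fold_zero : ∀ (ds : List Int) (b : Int),
    ((ds.foldl stepP (0, b)).1 + (ds.foldl stepP (0, b)).2) = b * 8 ^ ds.length := by
  intro ds
  induction ds with
  | nil => intro b; simp
  | cons g ds ih =>
    intro b
    have hstep : stepP (0, b) g = (0, b * 8) := by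
      simp [stepP]
    rw [List.foldl_cons, hstep, ih (b * 8)]
    simp [pow_succ]
    ring

lemma key : ∀ (cs : List Char) (b : Int), (∀ c ∈ cs, isDig c) →
    (((cs.map dig).foldl stepP (1, b)).1 + ((cs.map dig).foldl stepP (1, b)).2)
      = b * 8 ^ cs.length + altLoop cs 0 := by
  intro cs
  induction cs with
  | nil => intro b _; simp [altLoop]; ring
  | cons c rest ih =>
    intro b hd
    have hstep : stepP (1, b) (dig c) =
        ((if dig c = 4 ∨ dig c = 9 then 0 else 1), cg (dig c) + b * 8) := by
      simp [stepP]
    have halt : altLoop (c :: rest) 0 =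
        (if dig c = 4 ∨ dig c = 9 then cg (dig c) * 8 ^ rest.length
         else cg (dig c) * 8 ^ rest.length + altLoop rest 0) := by
      simp only [altLoop, dig, cg]
      split
      · ring_nf
      · rw [altLoop_acc]
        ring_nf
    rw [List.map_cons, List.foldl_cons, hstep, halt]
    by_cases hc : dig c = 4 ∨ dig c = 9
    · rw [if_pos hc, if_pos hc, fold_zero]
      simp [pow_succ]
      ring
    · rw [if_neg hc, if_neg hc, ih (cg (dig c) + b * 8) (fun c hc => hd c (List.mem_cons_of_mem _ hc))]
      simp [pow_succ]
      ring

-- ===== VERDICT (by name: the statement is the Claim_ definition above) =====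
theorem forbidden_spec : Claim_equal_forbidden := by
  intro n _ hpre
  show forbidden n = forbidden_alt n
  have hd := toChars_digits n hpre
  rw [A_eval n hd]
  show n - _ = n - altLoop (PySem.Int.toChars n) 0
  rw [key _ 0 hd]
  simp
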